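-- pv_equiv track=rewrite | github.com/HeHeYeast/VideoSummary | agent/pass1_classify.py | _parse_classification
-- ===== SOURCE A (Python) =====
-- def _parse_classification(raw: str) -> tuple[str, bool, str]:
--     """从模型输出解析分类结果."""
--     type_ = "transition"
--     has_text = False
--     brief = ""
--
--     for line in raw.strip().splitlines():
--         line = line.strip()
--         if line.upper().startswith("TYPE:"):
--             val = line.split(":", 1)[1].strip().lower()
--             valid = {"code", "slide", "diagram", "ui_demo", "talking_head", "transition"}
--             type_ = val if val in valid else "transition"
--         elif line.upper().startswith("HAS_TEXT:"):
--             val = line.split(":", 1)[1].strip().lower()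
--             has_text = val in ("true", "yes", "1")
--         elif line.upper().startswith("BRIEF:"):
--             brief = line.split(":", 1)[1].strip()[:60]
--
--     return type_, has_text, brief
-- ===== SOURCE B (Python) =====
-- def _parse_classification(raw: str) -> tuple[str, bool, str]:
--     # Phase 1: index each colon-bearing line into a dict, last occurrence wins.
--     fields = {}
--     for line in raw.strip().splitlines():
--         line = line.strip()
--         if ":" in line:
--             k, v = line.split(":", 1)
--             fields[k.upper()] = v.strip()
--     # Phase 2: three independent lookups.
--     t = fields.get("TYPE", "").lower()
--     valid = {"code", "slide", "diagram", "ui_demo", "talking_head", "transition"}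
--     type_ = t if t in valid else "transition"
--     has_text = fields.get("HAS_TEXT", "").lower() in ("true", "yes", "1")
--     brief = fields.get("BRIEF", "")[:60]
--     return type_, has_text, brief
-- ===== Notes on version B (the rewrite author's own statement) =====
-- stated objective: alternative
-- what changed: Replaces A's single branchy scanning loop (three prefix tests per line mutating three state variables) with an index-building pass that stores each colon-bearing line in a dict keyed by the text before the first colon (uppercased key, last occurrence wins) followed by three independent dict lookups that post-process TYPE/HAS_TEXT/BRIEF.
import Mathlib
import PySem

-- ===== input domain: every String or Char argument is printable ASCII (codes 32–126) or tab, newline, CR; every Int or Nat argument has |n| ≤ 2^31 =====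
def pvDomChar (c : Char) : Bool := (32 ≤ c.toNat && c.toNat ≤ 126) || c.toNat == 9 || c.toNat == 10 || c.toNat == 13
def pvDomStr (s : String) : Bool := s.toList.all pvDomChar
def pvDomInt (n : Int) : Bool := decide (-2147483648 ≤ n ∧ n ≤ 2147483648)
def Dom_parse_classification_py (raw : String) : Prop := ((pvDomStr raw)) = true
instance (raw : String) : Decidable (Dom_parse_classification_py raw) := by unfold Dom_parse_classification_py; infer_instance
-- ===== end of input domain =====

-- B replaces A's single branchy scanning loop by an index-building pass (dict of
-- upper-cased keys, last occurrence wins) followed by three independent lookups;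
-- same result, proved equal on all inputs. String ops are ported exactly on the
-- char-list side via PySem.Chars (the PySem.Str bridge).

-- ===== PORT A =====
def pvValid : List (List Char) :=
  ["code".toList, "slide".toList, "diagram".toList, "ui_demo".toList, "talking_head".toList, "transition".toList]

-- line.split(":", 1)[1]: sep ":" is non-empty so splitMax? is never none, and under the
-- startswith guard the split has a part [1]; the getD defaults are unreachable.
def pvSplitGet (line : List Char) (i : Int) : List Char :=
  (PySem.List.pyGet? ((PySem.Chars.splitMax? line [':'] 1).getD []) i).getD []

-- the body of A's for-loop, one line at a time over the state (type_, has_text, brief)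
def pvStepA (st : List Char × Bool × List Char) (line : List Char) : List Char × Bool × List Char :=
  if PySem.Chars.startswith (PySem.Chars.upper (PySem.Chars.strip line)) "TYPE:".toList then
    (if PySem.Chars.lower (PySem.Chars.strip (pvSplitGet (PySem.Chars.strip line) 1)) ∈ pvValid
       then PySem.Chars.lower (PySem.Chars.strip (pvSplitGet (PySem.Chars.strip line) 1))
       else "transition".toList, st.2.1, st.2.2)
  else if PySem.Chars.startswith (PySem.Chars.upper (PySem.Chars.strip line)) "HAS_TEXT:".toList then
    (st.1, PySem.Chars.lower (PySem.Chars.strip (pvSplitGet (PySem.Chars.strip line) 1))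
             ∈ ["true".toList, "yes".toList, "1".toList], st.2.2)
  else if PySem.Chars.startswith (PySem.Chars.upper (PySem.Chars.strip line)) "BRIEF:".toList then
    (st.1, st.2.1, PySem.Chars.slice (PySem.Chars.strip (pvSplitGet (PySem.Chars.strip line) 1)) none (some 60))
  else st

def parse_classification_py (raw : String) : String × Bool × String :=
  let r := (PySem.Chars.splitlines (PySem.Chars.strip raw.toList)).foldl pvStepA
    ("transition".toList, false, ([] : List Char))
  (String.ofList r.1, r.2.1, String.ofList r.2.2)

-- ===== PORT B =====
-- phase 1 body: store each colon-bearing line under its upper-cased key, last wins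
def pvStepB (d : PySem.Dict (List Char) (List Char)) (line : List Char) :
    PySem.Dict (List Char) (List Char) :=
  if PySem.Chars.isIn [':'] (PySem.Chars.strip line) then
    d.insert (PySem.Chars.upper (pvSplitGet (PySem.Chars.strip line) 0))
             (PySem.Chars.strip (pvSplitGet (PySem.Chars.strip line) 1))
  else d

-- phase 2: three independent lookups
def pvFinalize (d : PySem.Dict (List Char) (List Char)) : List Char × Bool × List Char :=
  (if PySem.Chars.lower (d.getD "TYPE".toList []) ∈ pvValid
     then PySem.Chars.lower (d.getD "TYPE".toList []) else "transition".toList,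
   PySem.Chars.lower (d.getD "HAS_TEXT".toList []) ∈ ["true".toList, "yes".toList, "1".toList],
   PySem.Chars.slice (d.getD "BRIEF".toList []) none (some 60))

def parse_classification_py_alt (raw : String) : String × Bool × String :=
  let d := (PySem.Chars.splitlines (PySem.Chars.strip raw.toList)).foldl pvStepB (PySem.Dict.mk [])
  let r := pvFinalize d
  (String.ofList r.1, r.2.1, String.ofList r.2.2)

-- ===== PRECONDITION & SPEC =====
def Spec_parse_classification_py (raw : String) (out : String × Bool × String) : Prop := out = parse_classification_py_alt raw
instance (raw : String) (out : String × Bool × String) : Decidable (Spec_parse_classification_py raw out) := by unfold Spec_parse_classification_py; infer_instance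

-- ===== CLAIM (what is proved, stated in full; the proofs are below) =====
def Claim_equal_parse_classification_py : Prop := ∀ (raw : String), Dom_parse_classification_py raw → Spec_parse_classification_py raw (parse_classification_py raw)

-- ===== LEMMAS AND PROOFS =====

theorem pv_go_zero (fuel : Nat) (l cur : List Char) (acc : List (List Char)) :
    PySem.Chars.splitOnMax.go [':'] fuel 0 l cur acc = ((cur.reverse ++ l) :: acc).reverse := by
  cases fuel with
  | zero => simp [PySem.Chars.splitOnMax.go]
  | succ f => cases l <;> simp [PySem.Chars.splitOnMax.go]

theorem pv_go_yes (fuel : Nat) : ∀ (pre post cur : List Char) (acc : List (List Char)),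
    pre.length + post.length + 1 ≤ fuel → ':' ∉ pre →
    PySem.Chars.splitOnMax.go [':'] fuel 1 (pre ++ ':' :: post) cur acc
      = acc.reverse ++ [cur.reverse ++ pre, post] := by
  induction fuel with
  | zero => intro pre post cur acc h _; omega
  | succ f ih =>
    intro pre post cur acc h hm
    cases pre with
    | nil =>
      simp only [List.nil_append]
      rw [PySem.Chars.splitOnMax.go]
      simp [List.isPrefixOf, pv_go_zero]
    | cons c pre' =>
      have hc : c ≠ ':' := fun e => hm (e ▸ List.mem_cons_self ..)
      simp at h hm
      simp only [List.cons_append]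
      rw [PySem.Chars.splitOnMax.go]
      simp [List.isPrefixOf, Ne.symm hc]
      rw [ih pre' post (c :: cur) acc (by omega) hm.2]
      simp

theorem pv_splitOnMax_yes (pre post : List Char) (hm : ':' ∉ pre) :
    PySem.Chars.splitOnMax (pre ++ ':' :: post) [':'] 1 = [pre, post] := by
  unfold PySem.Chars.splitOnMax
  rw [if_neg (by omega)]
  rw [show Int.toNat 1 = 1 from rfl]
  rw [pv_go_yes ((pre ++ ':' :: post).length + 1) pre post [] [] (by simp) hm]
  simp

theorem pv_upperChar_eq_colon (c : Char) : PySem.Chars.upperChar c = ':' ↔ c = ':' := by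
  unfold PySem.Chars.upperChar
  split
  · next h =>
    simp [PySem.Chars.islower, Char.le_def, UInt32.le_iff_toNat_le] at h
    have ha : 97 ≤ c.toNat := h.1
    have hz : c.toNat ≤ 122 := h.2
    constructor
    · intro he
      have hv : (c.toNat - 32).isValidChar := by left; omega
      have h58 : (Char.ofNat (c.toNat - 32)).toNat = c.toNat - 32 := by
        rw [Char.toNat_ofNat, if_pos hv]
      have h2 : (Char.ofNat (c.toNat - 32)).toNat = 58 := by rw [he]; rfl
      exfalso; omega
    · intro he
      subst he
      exfalso
      revert ha; decide
  · exact Iff.rfl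

theorem pv_startswith_colon_no (l : List Char) : ∀ (p : List Char), ':' ∉ l →
    PySem.Chars.startswith (PySem.Chars.upper l) (p ++ [':']) = false := by
  induction l with
  | nil => intro p _; cases p <;> simp [PySem.Chars.startswith, PySem.Chars.upper, List.isPrefixOf]
  | cons c rest ih =>
    intro p hm
    simp at hm
    cases p with
    | nil =>
      simp [PySem.Chars.startswith, PySem.Chars.upper, List.isPrefixOf]
      intro h
      exact hm.1 ((pv_upperChar_eq_colon c).mp h.symm).symm
    | cons q p' =>
      simp [PySem.Chars.startswith, PySem.Chars.upper, List.isPrefixOf] at ih ⊢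
      intro _
      exact ih p' hm.2

theorem pv_startswith_colon_yes (pre : List Char) : ∀ (post p : List Char), ':' ∉ pre → ':' ∉ p →
    (PySem.Chars.startswith (PySem.Chars.upper (pre ++ ':' :: post)) (p ++ [':'])
      = true ↔ PySem.Chars.upper pre = p) := by
  induction pre with
  | nil =>
    intro post p _ hp
    cases p with
    | nil =>
      simp [PySem.Chars.startswith, PySem.Chars.upper, List.isPrefixOf]
      decide
    | cons q p' =>
      simp at hp
      simp [PySem.Chars.startswith, PySem.Chars.upper, List.isPrefixOf]
      intro h _
      exact hp.1 (h.trans ((pv_upperChar_eq_colon ':').mpr rfl)).symm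
  | cons c pre' ih =>
    intro post p hm hp
    simp at hm
    cases p with
    | nil =>
      simp [PySem.Chars.startswith, PySem.Chars.upper, List.isPrefixOf]
      intro h
      exact hm.1 ((pv_upperChar_eq_colon c).mp h.symm).symm
    | cons q p' =>
      simp at hp
      simp [PySem.Chars.startswith, PySem.Chars.upper, List.isPrefixOf] at ih ⊢
      constructor
      · rintro ⟨h1, h2⟩
        exact ⟨h1.symm, (ih post p' hm.2 hp.2).mp h2⟩
      · rintro ⟨h1, h2⟩
        exact ⟨h1.symm, (ih post p' hm.2 hp.2).mpr h2⟩

theorem pv_isIn_colon (l : List Char) : PySem.Chars.isIn [':'] l = true ↔ ':' ∈ l := by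
  rw [PySem.Chars.isIn_iff_infix]
  constructor
  · intro h; exact h.mem (List.mem_singleton_self ':')
  · intro h
    obtain ⟨s, t, hst⟩ := List.append_of_mem h
    exact ⟨s, t, by simp [hst]⟩

theorem pv_colon_decomp (l : List Char) (h : ':' ∈ l) :
    ∃ pre post, l = pre ++ ':' :: post ∧ ':' ∉ pre := by
  induction l with
  | nil => cases h
  | cons c rest ih =>
    by_cases hc : c = ':'
    · exact ⟨[], rest, by simp [hc], by simp⟩
    · have hr : ':' ∈ rest := by
        rcases List.mem_cons.mp h with h1 | h1
        · exact absurd h1.symm hc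
        · exact h1
      obtain ⟨pre, post, h1, h2⟩ := ih hr
      exact ⟨c :: pre, post, by simp [h1], by simp [Ne.symm hc, h2]⟩

theorem pv_step_comm (d : PySem.Dict (List Char) (List Char)) (rawLine : List Char) :
    pvStepA (pvFinalize d) rawLine = pvFinalize (pvStepB d rawLine) := by
  unfold pvStepA pvStepB
  generalize PySem.Chars.strip rawLine = L
  by_cases hc : ':' ∈ L
  · obtain ⟨pre, post, hL, hpre⟩ := pv_colon_decomp L hc
    subst hL
    have hin : PySem.Chars.isIn [':'] (pre ++ ':' :: post) = true :=
      (pv_isIn_colon _).mpr (by simp)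
    have hsplit : PySem.Chars.splitMax? (pre ++ ':' :: post) [':'] 1 = some [pre, post] := by
      unfold PySem.Chars.splitMax?
      rw [if_neg (by simp), pv_splitOnMax_yes pre post hpre]
    have hget0 : pvSplitGet (pre ++ ':' :: post) 0 = pre := by
      simp [pvSplitGet, hsplit, PySem.List.pyGet?, PySem.List.pyIdx?]
    have hget1 : pvSplitGet (pre ++ ':' :: post) 1 = post := by
      simp [pvSplitGet, hsplit, PySem.List.pyGet?, PySem.List.pyIdx?]
    rw [hin]
    simp only [hget0, hget1, if_true]
    simp only [show "TYPE:".toList = "TYPE".toList ++ [':'] from by decide,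
      show "HAS_TEXT:".toList = "HAS_TEXT".toList ++ [':'] from by decide,
      show "BRIEF:".toList = "BRIEF".toList ++ [':'] from by decide]
    by_cases hT : PySem.Chars.upper pre = "TYPE".toList
    · rw [if_pos ((pv_startswith_colon_yes pre post "TYPE".toList hpre (by decide)).mpr hT), hT]
      simp [pvFinalize, PySem.Dict.getD_insert]
    · rw [if_neg (by
        intro h
        exact hT ((pv_startswith_colon_yes pre post "TYPE".toList hpre (by decide)).mp h))]
      by_cases hH : PySem.Chars.upper pre = "HAS_TEXT".toList
      · rw [if_pos ((pv_startswith_colon_yes pre post "HAS_TEXT".toList hpre (by decide)).mpr hH), hH]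
        simp [pvFinalize, PySem.Dict.getD_insert]
      · rw [if_neg (by
          intro h
          exact hH ((pv_startswith_colon_yes pre post "HAS_TEXT".toList hpre (by decide)).mp h))]
        by_cases hB : PySem.Chars.upper pre = "BRIEF".toList
        · rw [if_pos ((pv_startswith_colon_yes pre post "BRIEF".toList hpre (by decide)).mpr hB), hB]
          simp [pvFinalize, PySem.Dict.getD_insert]
        · rw [if_neg (by
            intro h
            exact hB ((pv_startswith_colon_yes pre post "BRIEF".toList hpre (by decide)).mp h))]
          simp at hT hH hB
          simp [pvFinalize, PySem.Dict.getD_insert, Ne.symm hT, Ne.symm hH, Ne.symm hB]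
  · have hin : PySem.Chars.isIn [':'] L = false := by
      cases h : PySem.Chars.isIn [':'] L
      · rfl
      · exact absurd ((pv_isIn_colon L).mp h) hc
    have t1 := pv_startswith_colon_no L "TYPE".toList hc
    have t2 := pv_startswith_colon_no L "HAS_TEXT".toList hc
    have t3 := pv_startswith_colon_no L "BRIEF".toList hc
    simp at t1 t2 t3
    simp [t1, t2, t3, hin]

theorem pv_fold_comm (lines : List (List Char)) : ∀ (d : PySem.Dict (List Char) (List Char)),
    lines.foldl pvStepA (pvFinalize d) = pvFinalize (lines.foldl pvStepB d) := by
  induction lines with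
  | nil => intro d; rfl
  | cons x xs ih =>
    intro d
    simp only [List.foldl_cons, pv_step_comm d x, ih (pvStepB d x)]

-- ===== VERDICT (by name: the statement is the Claim_ definition above) =====
theorem parse_classification_py_spec : Claim_equal_parse_classification_py := by
  intro raw _
  unfold Spec_parse_classification_py parse_classification_py parse_classification_py_alt
  have hinit : ("transition".toList, false, ([] : List Char)) = pvFinalize (PySem.Dict.mk []) := by
    decide
  rw [hinit, pv_fold_comm]
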